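-- pv_equiv track=rewrite | github.com/cepedus/Socio-emotional-Embodied-Conversational-Agents | course/ELIZA/utils.py | parse_reason
-- ===== SOURCE A (Python) =====
-- def parse_reason(s):
--     pairs = [
--         ("I have", "you have"),
--         ("I've", "you have"),
--         ("I am", "you are"),
--         ("I'm", "you are"),
--     ]
--
--     for s_orig, s_end in pairs:
--         s = s.replace(s_orig, s_end)
--
--     return s.lower()
-- ===== SOURCE B (Python) =====
-- import re
--
-- _REPL = {"I have": "you have", "I've": "you have", "I am": "you are", "I'm": "you are"}
-- _PAT = re.compile("I have|I've|I am|I'm")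
--
-- def parse_reason(s):
--     return _PAT.sub(lambda m: _REPL[m.group(0)], s).lower()
-- ===== Notes on version B (the rewrite author's own statement) =====
-- stated objective: idiomatic
-- what changed: Four sequential whole-string str.replace passes are replaced by one left-to-right re.sub scan over an alternation of the four literal patterns with a dict lookup for the replacement, then lower().
import Mathlib
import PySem

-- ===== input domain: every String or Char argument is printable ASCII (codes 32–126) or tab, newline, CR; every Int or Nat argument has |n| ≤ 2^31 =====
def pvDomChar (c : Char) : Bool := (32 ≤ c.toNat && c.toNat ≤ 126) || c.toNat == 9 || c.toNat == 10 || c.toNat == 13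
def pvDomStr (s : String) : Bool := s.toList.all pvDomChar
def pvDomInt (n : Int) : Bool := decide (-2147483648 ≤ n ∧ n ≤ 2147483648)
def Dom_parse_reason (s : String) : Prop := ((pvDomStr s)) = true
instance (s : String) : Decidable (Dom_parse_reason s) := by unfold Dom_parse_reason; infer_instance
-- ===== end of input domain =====

-- B replaces A's four sequential str.replace passes by a single left-to-right regex-style
-- scan with a table lookup (objective: idiomatic single pass); return values proved equal.

-- ===== PORT A =====
-- four sequential whole-string replace passes, then lower()
def parse_reason (s : String) : String :=
  let pairs : List (String × String) :=
    [("I have", "you have"), ("I've", "you have"), ("I am", "you are"), ("I'm", "you are")]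
  PySem.Str.lower (pairs.foldl (fun acc p => PySem.Str.replace acc p.1 p.2) s)

-- ===== PORT B =====
-- the replacement table (Source B's dict _REPL), as a PySem association-list dict
def pvTable : PySem.Dict (List Char) (List Char) :=
  PySem.Dict.ofList
  [("I have".toList, "you have".toList), ("I've".toList, "you have".toList),
   ("I am".toList, "you are".toList), ("I'm".toList, "you are".toList)]

-- dict lookup for a matched group (Source B's _REPL[m.group(0)]; every matched group is a key)
def pvLook (p : List Char) : List Char := (PySem.Dict.get? pvTable p).getD []

-- hand port of _PAT.sub over the alternation "I have|I've|I am|I'm": exact for this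
-- regex, since re.sub on an alternation of literals scans left to right and at each
-- position substitutes via the first alternative (in listed order) that matches there.
def pvScan : List Char → List Char
  | [] => []
  | c :: t =>
    if "I have".toList.isPrefixOf (c :: t) then pvLook "I have".toList ++ pvScan (t.drop 5)
    else if "I've".toList.isPrefixOf (c :: t) then pvLook "I've".toList ++ pvScan (t.drop 3)
    else if "I am".toList.isPrefixOf (c :: t) then pvLook "I am".toList ++ pvScan (t.drop 3)
    else if "I'm".toList.isPrefixOf (c :: t) then pvLook "I'm".toList ++ pvScan (t.drop 2)
    else c :: pvScan t
  termination_by l => l.length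
  decreasing_by all_goals (simp [List.length_drop]; try omega)

def parse_reason_alt (s : String) : String :=
  PySem.Str.lower (String.ofList (pvScan s.toList))

-- ===== PRECONDITION & SPEC =====
def Spec_parse_reason (s : String) (out : String) : Prop := out = parse_reason_alt s
instance (s : String) (out : String) : Decidable (Spec_parse_reason s out) := by unfold Spec_parse_reason; infer_instance

-- ===== CLAIM (what is proved, stated in full; the proofs are below) =====
def Claim_equal_parse_reason : Prop := ∀ (s : String), Dom_parse_reason s → Spec_parse_reason s (parse_reason s)

-- ===== LEMMAS AND PROOFS =====

-- structural (fuel-free) version of PySem.Chars.replace for a nonempty pattern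
def pvRepl (o : Char) (os new : List Char) : List Char → List Char
  | [] => []
  | c :: t =>
    if (o :: os).isPrefixOf (c :: t) then new ++ pvRepl o os new (t.drop os.length)
    else c :: pvRepl o os new t
  termination_by l => l.length
  decreasing_by all_goals (simp [List.length_drop]; try omega)

theorem pvRepl_go (o : Char) (os new : List Char) :
    ∀ (fuel : Nat) (l acc : List Char), l.length ≤ fuel →
      PySem.Chars.replace.go (o :: os) new fuel l acc = acc.reverse ++ pvRepl o os new l := by
  intro fuel
  induction fuel with
  | zero =>
    intro l acc h
    have hl : l = [] := List.eq_nil_of_length_eq_zero (Nat.le_zero.mp h)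
    subst hl
    simp [PySem.Chars.replace.go, pvRepl]
  | succ n ih =>
    intro l acc h
    match l with
    | [] => simp [PySem.Chars.replace.go, pvRepl]
    | c :: t =>
      rw [PySem.Chars.replace.go]
      by_cases hp : (o :: os).isPrefixOf (c :: t) = true
      · rw [if_pos hp, pvRepl, if_pos hp]
        have hd : (c :: t).drop (o :: os).length = t.drop os.length := by simp
        rw [hd, ih _ _ (by simp at h ⊢; omega)]
        simp
      · rw [if_neg hp, pvRepl, if_neg hp]
        rw [ih _ _ (by simp at h; omega)]
        simp

theorem pvReplace_eq (o : Char) (os new l : List Char) :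
    PySem.Chars.replace l (o :: os) new = pvRepl o os new l := by
  rw [PySem.Chars.replace]
  rw [if_neg (by simp)]
  exact (pvRepl_go o os new l.length l [] (le_refl _)).trans (by simp)

-- (A) a matching head position rewrites to the replacement
theorem pvRepl_match (o : Char) (os new : List Char) {l : List Char}
    (h : (o :: os).isPrefixOf l = true) :
    pvRepl o os new l = new ++ pvRepl o os new (l.drop (os.length + 1)) := by
  match l with
  | [] => simp [List.isPrefixOf] at h
  | c :: t => rw [pvRepl, if_pos h]; simp

-- (B) replace passes over a block containing no 'I' when the pattern starts with 'I'
theorem pvRepl_no_I (os new : List Char) (u : List Char) (hu : 'I' ∉ u) (v : List Char) :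
    pvRepl 'I' os new (u ++ v) = u ++ pvRepl 'I' os new v := by
  induction u with
  | nil => simp
  | cons d u' ih =>
    have hd : d ≠ 'I' := fun h => hu (h ▸ List.mem_cons_self)
    have hp : ¬ ('I' :: os).isPrefixOf (d :: (u' ++ v)) = true := by
      simp [List.isPrefixOf]
      intro h
      exact absurd h.symm hd
    rw [List.cons_append, pvRepl, if_neg hp]
    rw [ih (fun h => hu (List.mem_cons_of_mem _ h)), List.cons_append]

-- (C) replace steps over a non-matching literal block 'I' :: q₀ (no 'I' inside q₀)
theorem pvRepl_skip (os new q₀ v : List Char) (hq : 'I' ∉ q₀)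
    (hnp : ¬ ('I' :: os).isPrefixOf ('I' :: q₀ ++ v) = true) :
    pvRepl 'I' os new (('I' :: q₀) ++ v) = ('I' :: q₀) ++ pvRepl 'I' os new v := by
  rw [List.cons_append, pvRepl, if_neg (by simpa using hnp)]
  rw [pvRepl_no_I os new q₀ hq v, List.cons_append]

-- (D) if the replacement starts with 'y' and q avoids 'y', a prefix q of the replaced
-- list reflects back to a prefix of the original list
theorem pvRepl_reflect (os nrest : List Char) :
    ∀ (t q : List Char), 'y' ∉ q → q <+: pvRepl 'I' os ('y' :: nrest) t → q <+: t := by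
  intro t
  induction t using pvRepl.induct 'I' os with
  | case1 =>
    intro q hq h
    simpa [pvRepl] using h
  | case2 c t hp ih =>
    intro q hq h
    rw [pvRepl, if_pos hp] at h
    match q, hq, h with
    | [], _, _ => exact List.nil_prefix
    | d :: q', hq, h =>
      have hd : d = 'y' := (List.cons_prefix_cons.mp h).1
      exact absurd (hd ▸ List.mem_cons_self) hq
  | case3 c t hp ih =>
    intro q hq h
    rw [pvRepl, if_neg hp] at h
    match q, hq, h with
    | [], _, _ => exact List.nil_prefix
    | d :: q', hq, h =>
      obtain ⟨hdc, h'⟩ := List.cons_prefix_cons.mp h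
      exact List.cons_prefix_cons.mpr ⟨hdc, ih q' (fun hy => hq (List.mem_cons_of_mem _ hy)) h'⟩

-- abbreviations for the four passes of A
def pvR1 : List Char → List Char := pvRepl 'I' " have".toList "you have".toList
def pvR2 : List Char → List Char := pvRepl 'I' "'ve".toList "you have".toList
def pvR3 : List Char → List Char := pvRepl 'I' " am".toList "you are".toList
def pvR4 : List Char → List Char := pvRepl 'I' "'m".toList "you are".toList

theorem pvReflect1 {q t : List Char} (hq : 'y' ∉ q) (h : q <+: pvR1 t) : q <+: t :=
  pvRepl_reflect " have".toList "ou have".toList t q hq h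
theorem pvReflect2 {q t : List Char} (hq : 'y' ∉ q) (h : q <+: pvR2 t) : q <+: t :=
  pvRepl_reflect "'ve".toList "ou have".toList t q hq h
theorem pvReflect3 {q t : List Char} (hq : 'y' ∉ q) (h : q <+: pvR3 t) : q <+: t :=
  pvRepl_reflect " am".toList "ou are".toList t q hq h

theorem pvLook1 : pvLook "I have".toList = "you have".toList := by decide
theorem pvLook2 : pvLook "I've".toList = "you have".toList := by decide
theorem pvLook3 : pvLook "I am".toList = "you are".toList := by decide
theorem pvLook4 : pvLook "I'm".toList = "you are".toList := by decide

-- MAIN LEMMA: the four chained passes equal the single scan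
theorem pvChain_eq_scan : ∀ l : List Char, pvR4 (pvR3 (pvR2 (pvR1 l))) = pvScan l := by
  intro l
  induction l using pvScan.induct with
  | case1 => simp [pvR1, pvR2, pvR3, pvR4, pvRepl, pvScan]
  | case2 c t h1 ih =>
    -- "I have" matches at the head
    obtain ⟨v, hv⟩ := List.isPrefixOf_iff_prefix.mp h1
    have hvd : v = (c :: t).drop 6 := by rw [← hv]; rfl
    have e1 : pvR1 (c :: t) = "you have".toList ++ pvR1 v := by
      rw [pvR1, pvRepl_match 'I' " have".toList "you have".toList h1]
      exact congrArg _ (congrArg _ hvd.symm)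
    have e2 : pvR4 (pvR3 (pvR2 (pvR1 (c :: t)))) =
        "you have".toList ++ pvR4 (pvR3 (pvR2 (pvR1 v))) := by
      rw [e1, pvR2, pvRepl_no_I _ _ _ (by decide), pvR3, pvRepl_no_I _ _ _ (by decide),
          pvR4, pvRepl_no_I _ _ _ (by decide)]
    have hdrop : t.drop 5 = v := hvd.symm
    rw [e2, ← hdrop, ih, pvScan, if_pos h1, pvLook1]
  | case3 c t h1 h2 ih =>
    -- "I've" matches at the head, "I have" does not
    obtain ⟨v, hv⟩ := List.isPrefixOf_iff_prefix.mp h2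
    have hvd : v = (c :: t).drop 4 := by rw [← hv]; rfl
    have e1 : pvR1 (c :: t) = "I've".toList ++ pvR1 v := by
      rw [← hv, pvR1]
      exact pvRepl_skip " have".toList "you have".toList "'ve".toList v (by decide)
        (fun hc => h1 (by rw [← hv]; exact hc))
    have e2 : pvR2 (pvR1 (c :: t)) = "you have".toList ++ pvR2 (pvR1 v) := by
      rw [e1, pvR2]
      exact (pvRepl_match 'I' "'ve".toList "you have".toList
          (List.isPrefixOf_iff_prefix.mpr ⟨pvR1 v, rfl⟩)).trans
        (congrArg _ (congrArg _
          (show ("I've".toList ++ pvR1 v).drop ("'ve".toList.length + 1) = pvR1 v from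
            List.drop_left (l₁ := "I've".toList) (l₂ := pvR1 v))))
    have e3 : pvR4 (pvR3 (pvR2 (pvR1 (c :: t)))) =
        "you have".toList ++ pvR4 (pvR3 (pvR2 (pvR1 v))) := by
      rw [e2, pvR3, pvRepl_no_I _ _ _ (by decide), pvR4, pvRepl_no_I _ _ _ (by decide)]
    have hdrop : t.drop 3 = v := hvd.symm
    rw [e3, ← hdrop, ih, pvScan, if_neg h1, if_pos h2, pvLook2]
  | case4 c t h1 h2 h3 ih =>
    -- "I am" matches at the head, earlier alternatives do not
    obtain ⟨v, hv⟩ := List.isPrefixOf_iff_prefix.mp h3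
    have hvd : v = (c :: t).drop 4 := by rw [← hv]; rfl
    have e1 : pvR1 (c :: t) = "I am".toList ++ pvR1 v := by
      rw [← hv, pvR1]
      exact pvRepl_skip " have".toList "you have".toList " am".toList v (by decide)
        (fun hc => h1 (by rw [← hv]; exact hc))
    have e2 : pvR2 (pvR1 (c :: t)) = "I am".toList ++ pvR2 (pvR1 v) := by
      rw [e1, pvR2]
      exact pvRepl_skip "'ve".toList "you have".toList " am".toList (pvR1 v) (by decide)
        (by simp [List.isPrefixOf])
    have e3 : pvR3 (pvR2 (pvR1 (c :: t))) = "you are".toList ++ pvR3 (pvR2 (pvR1 v)) := by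
      rw [e2, pvR3]
      exact (pvRepl_match 'I' " am".toList "you are".toList
          (List.isPrefixOf_iff_prefix.mpr ⟨pvR2 (pvR1 v), rfl⟩)).trans
        (congrArg _ (congrArg _
          (show ("I am".toList ++ pvR2 (pvR1 v)).drop (" am".toList.length + 1) = pvR2 (pvR1 v) from
            List.drop_left (l₁ := "I am".toList) (l₂ := pvR2 (pvR1 v)))))
    have e4 : pvR4 (pvR3 (pvR2 (pvR1 (c :: t)))) =
        "you are".toList ++ pvR4 (pvR3 (pvR2 (pvR1 v))) := by
      rw [e3, pvR4, pvRepl_no_I _ _ _ (by decide)]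
    have hdrop : t.drop 3 = v := hvd.symm
    rw [e4, ← hdrop, ih, pvScan, if_neg h1, if_neg h2, if_pos h3, pvLook3]
  | case5 c t h1 h2 h3 h4 ih =>
    -- "I'm" matches at the head, earlier alternatives do not
    obtain ⟨v, hv⟩ := List.isPrefixOf_iff_prefix.mp h4
    have hvd : v = (c :: t).drop 3 := by rw [← hv]; rfl
    have e1 : pvR1 (c :: t) = "I'm".toList ++ pvR1 v := by
      rw [← hv, pvR1]
      exact pvRepl_skip " have".toList "you have".toList "'m".toList v (by decide)
        (fun hc => h1 (by rw [← hv]; exact hc))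
    have e2 : pvR2 (pvR1 (c :: t)) = "I'm".toList ++ pvR2 (pvR1 v) := by
      rw [e1, pvR2]
      exact pvRepl_skip "'ve".toList "you have".toList "'m".toList (pvR1 v) (by decide)
        (by simp [List.isPrefixOf])
    have e3 : pvR3 (pvR2 (pvR1 (c :: t))) = "I'm".toList ++ pvR3 (pvR2 (pvR1 v)) := by
      rw [e2, pvR3]
      exact pvRepl_skip " am".toList "you are".toList "'m".toList (pvR2 (pvR1 v)) (by decide)
        (by simp [List.isPrefixOf])
    have e4 : pvR4 (pvR3 (pvR2 (pvR1 (c :: t)))) =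
        "you are".toList ++ pvR4 (pvR3 (pvR2 (pvR1 v))) := by
      rw [e3, pvR4]
      exact (pvRepl_match 'I' "'m".toList "you are".toList
          (List.isPrefixOf_iff_prefix.mpr ⟨pvR3 (pvR2 (pvR1 v)), rfl⟩)).trans
        (congrArg _ (congrArg _
          (show ("I'm".toList ++ pvR3 (pvR2 (pvR1 v))).drop ("'m".toList.length + 1) = pvR3 (pvR2 (pvR1 v)) from
            List.drop_left (l₁ := "I'm".toList) (l₂ := pvR3 (pvR2 (pvR1 v))))))
    have hdrop : t.drop 2 = v := hvd.symm
    rw [e4, ← hdrop, ih, pvScan, if_neg h1, if_neg h2, if_neg h3, if_pos h4, pvLook4]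
  | case6 c t h1 h2 h3 h4 ih =>
    -- no alternative matches at the head: every pass steps over c
    have e1 : pvR1 (c :: t) = c :: pvR1 t := by
      rw [pvR1, pvRepl, if_neg (show ¬ ('I' :: " have".toList).isPrefixOf (c :: t) = true from h1)]
    have n2 : ¬ ('I' :: "'ve".toList).isPrefixOf (c :: pvR1 t) = true := by
      intro h
      obtain ⟨hc, h'⟩ := List.cons_prefix_cons.mp (List.isPrefixOf_iff_prefix.mp h)
      exact h2 (List.isPrefixOf_iff_prefix.mpr
        (List.cons_prefix_cons.mpr ⟨hc, pvReflect1 (by decide) h'⟩))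
    have e2 : pvR2 (pvR1 (c :: t)) = c :: pvR2 (pvR1 t) := by
      rw [e1, pvR2, pvRepl, if_neg n2]
    have n3 : ¬ ('I' :: " am".toList).isPrefixOf (c :: pvR2 (pvR1 t)) = true := by
      intro h
      obtain ⟨hc, h'⟩ := List.cons_prefix_cons.mp (List.isPrefixOf_iff_prefix.mp h)
      exact h3 (List.isPrefixOf_iff_prefix.mpr
        (List.cons_prefix_cons.mpr ⟨hc, pvReflect1 (by decide) (pvReflect2 (by decide) h')⟩))
    have e3 : pvR3 (pvR2 (pvR1 (c :: t))) = c :: pvR3 (pvR2 (pvR1 t)) := by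
      rw [e2, pvR3, pvRepl, if_neg n3]
    have n4 : ¬ ('I' :: "'m".toList).isPrefixOf (c :: pvR3 (pvR2 (pvR1 t))) = true := by
      intro h
      obtain ⟨hc, h'⟩ := List.cons_prefix_cons.mp (List.isPrefixOf_iff_prefix.mp h)
      exact h4 (List.isPrefixOf_iff_prefix.mpr
        (List.cons_prefix_cons.mpr ⟨hc, pvReflect1 (by decide) (pvReflect2 (by decide) (pvReflect3 (by decide) h'))⟩))
    have e4 : pvR4 (pvR3 (pvR2 (pvR1 (c :: t)))) = c :: pvR4 (pvR3 (pvR2 (pvR1 t))) := by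
      rw [e3, pvR4, pvRepl, if_neg n4]
    rw [e4, ih, pvScan, if_neg h1, if_neg h2, if_neg h3, if_neg h4]

-- lift the main lemma to strings: the folded replaces equal the scan, character-wise
theorem pvFold_toList (s : String) :
    ([("I have", "you have"), ("I've", "you have"), ("I am", "you are"), ("I'm", "you are")].foldl
      (fun acc p => PySem.Str.replace acc p.1 p.2) s).toList = pvScan s.toList := by
  simp only [List.foldl, PySem.Str.toList_replace]
  rw [show "I have".toList = 'I' :: " have".toList from rfl,
      show "I've".toList = 'I' :: "'ve".toList from rfl,
      show "I am".toList = 'I' :: " am".toList from rfl,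
      show "I'm".toList = 'I' :: "'m".toList from rfl]
  rw [pvReplace_eq 'I' " have".toList "you have".toList,
      pvReplace_eq 'I' "'ve".toList "you have".toList,
      pvReplace_eq 'I' " am".toList "you are".toList,
      pvReplace_eq 'I' "'m".toList "you are".toList]
  exact pvChain_eq_scan s.toList

-- ===== VERDICT (by name: the statement is the Claim_ definition above) =====
theorem parse_reason_spec : Claim_equal_parse_reason := by
  intro s _
  show PySem.Str.lower
      ([("I have", "you have"), ("I've", "you have"), ("I am", "you are"), ("I'm", "you are")].foldl
        (fun acc p => PySem.Str.replace acc p.1 p.2) s)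
    = PySem.Str.lower (String.ofList (pvScan s.toList))
  exact congrArg PySem.Str.lower
    (String.toList_inj.mp (by rw [String.toList_ofList]; exact pvFold_toList s))
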